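-- pv_equiv track=rewrite | github.com/dragonesse/aoc | 2020/day18.py | evaluate_result_simple_ops
-- ===== SOURCE A (Python) =====
-- def evaluate_result_simple_ops (equation):
--     tokens = []
--     if ('(' in equation) or (')' in equation):
--         print ("not supposed to process nested levels")
--         return None
--
--     tokens = equation.split(" ")
--     # process operations from left to right
--     res = int(tokens[0])
--     for ti in range(1,len(tokens),2):
--         if tokens[ti] == '+':
--             res += int(tokens[ti+1])
--         elif tokens[ti] == '*':
--             res *= int(tokens[ti+1])
--
--     return res
-- ===== SOURCE B (Python) =====
-- def evaluate_result_simple_ops(equation):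
--     if '(' in equation or ')' in equation:
--         print("not supposed to process nested levels")
--         return None
--     tokens = equation.split(" ")
--     # Distributive right-to-left pass: the left-to-right value equals
--     # int(tokens[0]) * mult + acc, where mult is the product of all '*'
--     # operands and acc is the sum of each '+' operand times the product of
--     # the '*' operands applied after it.
--     mult = 1
--     acc = 0
--     for i in reversed(range(1, len(tokens), 2)):
--         if tokens[i] == '*':
--             mult *= int(tokens[i + 1])
--         elif tokens[i] == '+':
--             acc += int(tokens[i + 1]) * mult
--     return int(tokens[0]) * mult + acc
-- ===== Notes on version B (the rewrite author's own statement) =====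
-- stated objective: alternative
-- what changed: A folds a single running result forward, applying each operator as it meets it; B instead walks the operator/operand pairs right-to-left maintaining two accumulators (mult = product of the '*' operands seen so far, acc = sum of each '+' operand times the multipliers applied after it) and returns int(tokens[0])*mult + acc, correct by distributivity of the left-to-right evaluation.
import Mathlib
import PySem

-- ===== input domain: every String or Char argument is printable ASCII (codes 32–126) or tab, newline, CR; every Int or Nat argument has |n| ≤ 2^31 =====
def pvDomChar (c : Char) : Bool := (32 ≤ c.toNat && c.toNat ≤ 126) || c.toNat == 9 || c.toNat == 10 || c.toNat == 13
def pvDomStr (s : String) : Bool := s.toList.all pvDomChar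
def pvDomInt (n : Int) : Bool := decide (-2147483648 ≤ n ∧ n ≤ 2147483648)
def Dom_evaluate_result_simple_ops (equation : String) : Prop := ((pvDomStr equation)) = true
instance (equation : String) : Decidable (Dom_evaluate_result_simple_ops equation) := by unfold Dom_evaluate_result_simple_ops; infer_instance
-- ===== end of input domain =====

-- B replaces A's forward accumulator loop by a distributive right-to-left pass
-- (result = first * mult + acc); same cost, a genuinely different computation.

-- ===== PORT A =====
-- literal transliteration of A; on inputs excluded by Pre_ (where Python raises
-- IndexError/ValueError) the out-of-range lookup defaults to "" and a failed int() to 0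
def evaluate_result_simple_ops (equation : String) : Option Int :=
  if PySem.Str.isIn "(" equation || PySem.Str.isIn ")" equation then
    none
  else
    let tokens := (PySem.Str.split? equation " ").getD []   -- sep is the literal " " ≠ "", so split? is always some
    let res := (PySem.Int.ofStr? (PySem.List.pyGetD tokens 0 "")).getD 0
    some ((PySem.List.pyRange 1 (tokens.length : Int) 2).foldl
      (fun res ti =>
        if PySem.List.pyGetD tokens ti "" == "+" then
          res + (PySem.Int.ofStr? (PySem.List.pyGetD tokens (ti + 1) "")).getD 0
        else if PySem.List.pyGetD tokens ti "" == "*" then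
          res * (PySem.Int.ofStr? (PySem.List.pyGetD tokens (ti + 1) "")).getD 0
        else res) res)

-- ===== PORT B =====
-- B's reversed(range(1, len(tokens), 2)) loop with the two accumulators (mult, acc)
def evaluate_result_simple_ops_alt (equation : String) : Option Int :=
  if PySem.Str.isIn "(" equation || PySem.Str.isIn ")" equation then
    none
  else
    let tokens := (PySem.Str.split? equation " ").getD []   -- sep is the literal " " ≠ "", so split? is always some
    let p := ((PySem.List.pyRange 1 (tokens.length : Int) 2).reverse).foldl
      (fun (p : Int × Int) i =>
        if PySem.List.pyGetD tokens i "" == "*" then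
          (p.1 * (PySem.Int.ofStr? (PySem.List.pyGetD tokens (i + 1) "")).getD 0, p.2)
        else if PySem.List.pyGetD tokens i "" == "+" then
          (p.1, p.2 + (PySem.Int.ofStr? (PySem.List.pyGetD tokens (i + 1) "")).getD 0 * p.1)
        else p) (1, 0)
    some ((PySem.Int.ofStr? (PySem.List.pyGetD tokens 0 "")).getD 0 * p.1 + p.2)

-- ===== PRECONDITION & SPEC =====
-- the operator/operand tail is well-formed: every '+'/'*' operator has a following
-- operand that int() accepts; a trailing lone token may be anything but '+'/'*'
-- (Python would raise IndexError there); operands after other tokens are never parsed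
def pvOpsOK : List String → Bool
  | op :: val :: rest =>
      (!(op == "+" || op == "*") || (PySem.Int.ofStr? val).isSome) && pvOpsOK rest
  | [op] => !(op == "+" || op == "*")
  | [] => true

-- Pre_ holds exactly where Python A returns without raising: either the parenthesis
-- guard fires (returns None), or the first token parses as an int (else ValueError)
-- and the operator/operand tail is well-formed (else IndexError/ValueError)
def Pre_evaluate_result_simple_ops (equation : String) : Prop :=
  ((PySem.Str.isIn "(" equation || PySem.Str.isIn ")" equation)
   || ((PySem.Int.ofStr? (PySem.List.pyGetD ((PySem.Str.split? equation " ").getD []) 0 "")).isSome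
       && pvOpsOK (((PySem.Str.split? equation " ").getD []).drop 1))) = true
instance (equation : String) : Decidable (Pre_evaluate_result_simple_ops equation) := by
  unfold Pre_evaluate_result_simple_ops; infer_instance

def pvWitness_evaluate_result_simple_ops : String := "1 + 2 * 3"

def Spec_evaluate_result_simple_ops (equation : String) (out : Option Int) : Prop :=
  out = evaluate_result_simple_ops_alt equation
instance (equation : String) (out : Option Int) : Decidable (Spec_evaluate_result_simple_ops equation out) := by
  unfold Spec_evaluate_result_simple_ops; infer_instance

-- ===== CLAIM (what is proved, stated in full; the proofs are below) =====
def Claim_equal_evaluate_result_simple_ops : Prop := ∀ (equation : String), Dom_evaluate_result_simple_ops equation → Pre_evaluate_result_simple_ops equation → Spec_evaluate_result_simple_ops equation (evaluate_result_simple_ops equation)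

-- ===== LEMMAS AND PROOFS =====

-- A's forward accumulator fold over any index list equals B's backward (mult, acc)
-- pass, by distributivity: fold res r = res * mult + acc.
theorem pvFold_distrib (tokens : List String) : ∀ (r : List Int) (res : Int),
    r.foldl
      (fun res ti =>
        if PySem.List.pyGetD tokens ti "" == "+" then
          res + (PySem.Int.ofStr? (PySem.List.pyGetD tokens (ti + 1) "")).getD 0
        else if PySem.List.pyGetD tokens ti "" == "*" then
          res * (PySem.Int.ofStr? (PySem.List.pyGetD tokens (ti + 1) "")).getD 0
        else res) res
    = res * (r.reverse.foldl
        (fun (p : Int × Int) i =>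
          if PySem.List.pyGetD tokens i "" == "*" then
            (p.1 * (PySem.Int.ofStr? (PySem.List.pyGetD tokens (i + 1) "")).getD 0, p.2)
          else if PySem.List.pyGetD tokens i "" == "+" then
            (p.1, p.2 + (PySem.Int.ofStr? (PySem.List.pyGetD tokens (i + 1) "")).getD 0 * p.1)
          else p) (1, 0)).1
      + (r.reverse.foldl
        (fun (p : Int × Int) i =>
          if PySem.List.pyGetD tokens i "" == "*" then
            (p.1 * (PySem.Int.ofStr? (PySem.List.pyGetD tokens (i + 1) "")).getD 0, p.2)
          else if PySem.List.pyGetD tokens i "" == "+" then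
            (p.1, p.2 + (PySem.Int.ofStr? (PySem.List.pyGetD tokens (i + 1) "")).getD 0 * p.1)
          else p) (1, 0)).2
  | [], res => by simp
  | ti :: rest, res => by
      have h := pvFold_distrib tokens rest
      rw [List.reverse_cons, List.foldl_append, List.foldl_cons, List.foldl_cons,
        List.foldl_nil]
      by_cases h1 : PySem.List.pyGetD tokens ti "" = "+"
      · simp only [h1, beq_self_eq_true, if_true,
          show (("+" : String) == "*") = false from rfl, Bool.false_eq_true, if_false]
        rw [h]; ring
      · by_cases h2 : PySem.List.pyGetD tokens ti "" = "*"
        · simp only [h2, beq_self_eq_true, if_true,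
            show (("*" : String) == "+") = false from rfl, Bool.false_eq_true, if_false]
          rw [h]; ring
        · simp only [beq_eq_false_iff_ne.mpr h1, beq_eq_false_iff_ne.mpr h2,
            Bool.false_eq_true, if_false]
          rw [h]

-- ===== VERDICT (by name: the statement is the Claim_ definition above) =====
theorem evaluate_result_simple_ops_spec : Claim_equal_evaluate_result_simple_ops := by
  intro equation _hdom _hpre
  unfold Spec_evaluate_result_simple_ops
  unfold evaluate_result_simple_ops evaluate_result_simple_ops_alt
  by_cases hp : (PySem.Str.isIn "(" equation || PySem.Str.isIn ")" equation) = true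
  · simp only [hp, if_pos]
  · rw [Bool.not_eq_true] at hp
    simp only [hp, Bool.false_eq_true, if_false, Option.some.injEq]
    exact pvFold_distrib _ _ _
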